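-- pv_equiv track=rewrite | github.com/Daniela02092005/SmartMathPy | Fundamentos/Relaciones.py | extremos
-- ===== SOURCE A (Python) =====
-- def extremos(P: set,lower_bound: set, upper_bound: set):
--     """
--     The function `extremos` takes three sets as input (P, lower_bound, upper_bound) and returns two sets
--     containing elements that are the lower and upper bounds of P.
--     """
--     discard = set()
--
--     for m in upper_bound:
--         for x in upper_bound:
--             if (m, x) not in P:
--                 discard.add(m)
--                 break
--
--     sup = set(upper_bound - discard)
--     discard.clear()
--
--     for n in lower_bound:
--         for x in lower_bound:
--             if (x, n) not in P:
--                 discard.add(n)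
--                 break
--
--     inf = set(lower_bound - discard)
--
--     return inf, sup
-- ===== SOURCE B (Python) =====
-- def extremos(P: set, lower_bound: set, upper_bound: set):
--     # One pass over the relation P builds two count tables; an element is a
--     # supremum/infimum candidate iff its count reaches the full bound size.
--     uc = {}
--     lc = {}
--     for a, b in P:
--         if a in upper_bound and b in upper_bound:
--             uc[a] = uc.get(a, 0) + 1
--         if a in lower_bound and b in lower_bound:
--             lc[b] = lc.get(b, 0) + 1
--     nu = len(upper_bound)
--     nl = len(lower_bound)
--     sup = {m for m in upper_bound if uc.get(m, 0) == nu}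
--     inf = {n for n in lower_bound if lc.get(n, 0) == nl}
--     return inf, sup
-- ===== Notes on version B (the rewrite author's own statement) =====
-- stated objective: faster
-- what changed: Instead of A's nested scan (for every bound element, re-test all pairs against P), B makes one pass over the relation P building two count tables keyed by coordinate, and keeps an element iff its count equals the bound's size.
import Mathlib
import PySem

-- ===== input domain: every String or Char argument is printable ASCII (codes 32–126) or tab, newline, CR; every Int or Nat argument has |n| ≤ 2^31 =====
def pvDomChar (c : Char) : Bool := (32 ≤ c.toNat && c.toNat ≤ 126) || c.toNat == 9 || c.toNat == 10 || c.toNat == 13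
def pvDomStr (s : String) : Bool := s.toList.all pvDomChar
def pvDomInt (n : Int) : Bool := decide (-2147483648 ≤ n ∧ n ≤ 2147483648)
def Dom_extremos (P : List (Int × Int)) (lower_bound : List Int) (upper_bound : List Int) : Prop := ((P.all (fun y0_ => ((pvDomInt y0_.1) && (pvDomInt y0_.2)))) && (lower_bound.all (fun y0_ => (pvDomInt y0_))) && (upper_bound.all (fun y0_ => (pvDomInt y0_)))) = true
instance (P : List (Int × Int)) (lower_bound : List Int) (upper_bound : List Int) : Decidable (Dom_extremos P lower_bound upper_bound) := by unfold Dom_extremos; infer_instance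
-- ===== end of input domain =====

-- B replaces A's per-element nested rescans with a single counting pass over the relation P.


-- ===== PORT A =====
-- literal port of A: the Python arguments are sets (PySem.Set.ofList); the inner
-- 'for x in …: if (m,x) not in P: discard.add(m); break' is the first-hit test 'any'.
def extremos (P : List (Int × Int)) (lower_bound : List Int) (upper_bound : List Int) : List Int × List Int :=
  let Ps : PySem.Set (Int × Int) := PySem.Set.ofList P
  let ub : PySem.Set Int := PySem.Set.ofList upper_bound
  let lb : PySem.Set Int := PySem.Set.ofList lower_bound
  let discard1 : PySem.Set Int :=
    ub.foldl (fun d m =>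
      if ub.any (fun x => !(PySem.Set.contains Ps (m, x))) then PySem.Set.add d m else d)
      PySem.Set.empty
  let sup := PySem.Set.diff ub discard1
  let discard2 : PySem.Set Int :=
    lb.foldl (fun d n =>
      if lb.any (fun x => !(PySem.Set.contains Ps (x, n))) then PySem.Set.add d n else d)
      PySem.Set.empty
  let inf := PySem.Set.diff lb discard2
  (inf, sup)

-- ===== PORT B =====
-- literal port of Source B: ONE pass over the set P maintains the two count dicts
-- (the single Python loop with two accumulators is the fold over the pair);
-- each bound is then filtered by 'count == size of the bound'.
def extremos_alt (P : List (Int × Int)) (lower_bound : List Int) (upper_bound : List Int) : List Int × List Int :=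
  let Pd : PySem.Set (Int × Int) := PySem.Set.ofList P
  let U : PySem.Set Int := PySem.Set.ofList upper_bound
  let L : PySem.Set Int := PySem.Set.ofList lower_bound
  let st :=
    Pd.foldl (fun (st : PySem.Dict Int Int × PySem.Dict Int Int) p =>
      (if PySem.Set.contains U p.1 && PySem.Set.contains U p.2 then st.1.modify p.1 0 (· + 1) else st.1,
       if PySem.Set.contains L p.1 && PySem.Set.contains L p.2 then st.2.modify p.2 0 (· + 1) else st.2))
      (PySem.Dict.empty, PySem.Dict.empty)
  let nu : Int := (U.length : Int)
  let nl : Int := (L.length : Int)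
  let sup := U.filter (fun m => st.1.getD m 0 == nu)
  let inf := L.filter (fun n => st.2.getD n 0 == nl)
  (inf, sup)

-- ===== PRECONDITION & SPEC =====
def Spec_extremos (P : List (Int × Int)) (lower_bound : List Int) (upper_bound : List Int) (out : List Int × List Int) : Prop := out = extremos_alt P lower_bound upper_bound
instance (P : List (Int × Int)) (lower_bound : List Int) (upper_bound : List Int) (out : List Int × List Int) : Decidable (Spec_extremos P lower_bound upper_bound out) := by unfold Spec_extremos; infer_instance

-- ===== CLAIM (what is proved, stated in full; the proofs are below) =====
def Claim_equal_extremos : Prop := ∀ (P : List (Int × Int)) (lower_bound : List Int) (upper_bound : List Int), Dom_extremos P lower_bound upper_bound → Spec_extremos P lower_bound upper_bound (extremos P lower_bound upper_bound)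

-- ===== LEMMAS AND PROOFS =====

-- The combinatorial core, stated once for both sides (sup: mk x = (m,x); inf: mk x = (x,m)).
-- For a duplicate-free relation Pd and duplicate-free bound U with m ∈ U: the number of
-- pairs of Pd whose key coordinate is m and whose other coordinate lies in U equals |U|
-- iff every x ∈ U pairs with m inside Pd.
theorem pv_count_core (Pd : List (Int × Int)) (U : List Int)
    (kf ks : Int × Int → Int) (mk : Int → Int × Int) (m : Int)
    (hPd : Pd.Nodup) (hU : U.Nodup)
    (hkf : ∀ x, kf (mk x) = m) (hks : ∀ x, ks (mk x) = x)
    (hrec : ∀ p, kf p = m → mk (ks p) = p) :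
    (Pd.countP (fun p => (kf p == m) && U.contains (ks p)) = U.length)
      ↔ ∀ x ∈ U, (mk x) ∈ Pd := by
  set S := Pd.filter (fun p => (kf p == m) && U.contains (ks p)) with hS
  have hcount : Pd.countP (fun p => (kf p == m) && U.contains (ks p)) = S.length := by
    rw [hS, List.countP_eq_length_filter]
  set T := U.filter (fun x => decide (mk x ∈ Pd)) with hT
  have hSmem : ∀ p ∈ S, kf p = m ∧ ks p ∈ U := by
    intro p hp
    rw [hS] at hp
    simp only [List.mem_filter, Bool.and_eq_true, beq_iff_eq, List.contains_eq_mem,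
      decide_eq_true_eq] at hp
    exact ⟨hp.2.1, hp.2.2⟩
  have hmapnd : (S.map ks).Nodup := by
    refine List.Nodup.map_on ?_ (hPd.filter _)
    intro p hp q hq hpq
    have h1 := (hSmem p hp).1
    have h2 := (hSmem q hq).1
    rw [← hrec p h1, ← hrec q h2, hpq]
  have hTnd : T.Nodup := hU.filter _
  have hmem : ∀ y, y ∈ S.map ks ↔ y ∈ T := by
    intro y
    rw [hS, hT]
    simp only [List.mem_map, List.mem_filter, Bool.and_eq_true, beq_iff_eq,
      List.contains_eq_mem, decide_eq_true_eq]
    constructor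
    · rintro ⟨p, ⟨hpPd, hkfp, hksU⟩, rfl⟩
      exact ⟨hksU, by rw [hrec p hkfp]; exact hpPd⟩
    · rintro ⟨hyU, hyPd⟩
      exact ⟨mk y, ⟨hyPd, hkf y, by rw [hks]; exact hyU⟩, hks y⟩
  have hperm : (S.map ks).Perm T := (List.perm_ext_iff_of_nodup hmapnd hTnd).2 hmem
  have hlen : S.length = T.length := by
    rw [← List.length_map (f := ks) (as := S)]
    exact hperm.length_eq
  rw [hcount, hlen, hT, List.length_filter_eq_length_iff]
  simp only [decide_eq_true_eq]

-- One side of the result (sup: key = fst; inf: key = snd): A's 'bound minus discard'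
-- equals B's 'bound filtered by full count'.
theorem pv_side (P : List (Int × Int)) (B : List Int)
    (key oth : Int × Int → Int) (pairmk : Int → Int → Int × Int)
    (hkey : ∀ m x, key (pairmk m x) = m) (hoth : ∀ m x, oth (pairmk m x) = x)
    (hrec : ∀ p m, key p = m → pairmk m (oth p) = p) :
    PySem.Set.diff (PySem.Set.ofList B)
      ((PySem.Set.ofList B).foldl (fun d m =>
        if (PySem.Set.ofList B).any (fun x => !(PySem.Set.contains (PySem.Set.ofList P) (pairmk m x)))
        then PySem.Set.add d m else d) PySem.Set.empty)
    = (PySem.Set.ofList B).filter (fun m =>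
        (((PySem.Set.ofList P)).foldl (fun d p =>
          if PySem.Set.contains (PySem.Set.ofList B) (key p) && PySem.Set.contains (PySem.Set.ofList B) (oth p)
          then d.modify (key p) 0 (· + 1) else d) PySem.Dict.empty).getD m 0
          == ((PySem.Set.ofList B).length : Int)) := by
  set Bs : PySem.Set Int := PySem.Set.ofList B with hBs
  set Pd : PySem.Set (Int × Int) := PySem.Set.ofList P with hPd
  have hBnd : Bs.Nodup := PySem.Set.nodup_ofList B
  have hPnd : Pd.Nodup := PySem.Set.nodup_ofList P
  have hdisc : (Bs.foldl (fun d m =>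
        if Bs.any (fun x => !(PySem.Set.contains Pd (pairmk m x)))
        then PySem.Set.add d m else d) PySem.Set.empty)
      = PySem.Set.ofList (Bs.filter (fun m => Bs.any (fun x => !(PySem.Set.contains Pd (pairmk m x))))) := by
    rw [PySem.List.foldl_if_eq_foldl_filter, PySem.Set.ofList_eq_foldl]
    rfl
  rw [hdisc]
  have hcnt : ∀ m : Int, ((Pd.foldl (fun d p =>
        if PySem.Set.contains Bs (key p) && PySem.Set.contains Bs (oth p)
        then d.modify (key p) 0 (· + 1) else d) PySem.Dict.empty).getD m 0)
      = ((Pd.countP (fun p => (key p == m) && (PySem.Set.contains Bs (key p) && PySem.Set.contains Bs (oth p)))) : Int) := by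
    intro m
    rw [PySem.List.foldl_if_eq_foldl_filter,
      ← List.foldl_map (f := key) (g := fun (d : PySem.Dict Int Int) x => d.modify x 0 (· + 1)),
      PySem.Dict.getD_foldl_modify_add_one, PySem.Dict.getD_empty, List.count_eq_countP,
      List.countP_map, List.countP_filter]
    simp only [Function.comp, zero_add]
  have hdiff_filter : ∀ (t : PySem.Set Int), PySem.Set.diff Bs t = Bs.filter (fun x => !(PySem.Set.contains t x)) := fun _ => rfl
  rw [hdiff_filter]
  apply List.filter_congr
  intro m hm
  have hbeq : ∀ (a b : Bool), (a = true ↔ b = true) → a = b := by decide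
  apply hbeq
  have hleft : (!(PySem.Set.contains (PySem.Set.ofList (Bs.filter (fun m => Bs.any (fun x => !(PySem.Set.contains Pd (pairmk m x)))))) m)) = true
      ↔ ∀ x ∈ Bs, (pairmk m x) ∈ Pd := by
    simp only [PySem.Set.contains_eq_listContains, List.contains_eq_mem, Bool.not_eq_true',
      decide_eq_false_iff_not, PySem.Set.mem_ofList, List.mem_filter, hm, true_and,
      List.any_eq_true, Bool.not_eq_true', decide_eq_false_iff_not, not_exists, not_and, not_not]
  rw [hleft, hcnt]
  have hcong : Pd.countP (fun p => (key p == m) && (PySem.Set.contains Bs (key p) && PySem.Set.contains Bs (oth p)))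
      = Pd.countP (fun p => (key p == m) && Bs.contains (oth p)) := by
    apply List.countP_congr
    intro p hp
    by_cases hk : key p = m
    · have hmem : PySem.Set.contains Bs (key p) = true := by
        simp only [PySem.Set.contains_eq_listContains, List.contains_eq_mem, hk]
        exact decide_eq_true hm
      simp [hk]
      exact fun _ => hm
    · simp [hk, beq_iff_eq]
  rw [hcong]
  have hcore := pv_count_core Pd Bs key oth (pairmk m) m hPnd hBnd
    (fun x => hkey m x) (fun x => hoth m x) (fun p hp => hrec p m hp)
  rw [beq_iff_eq]
  constructor
  · intro h
    exact_mod_cast hcore.mpr h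
  · intro h
    exact hcore.mp (by exact_mod_cast h)

-- the two result components are equal: sup via (key, oth) = (fst, snd), inf via (snd, fst)
theorem pv_main (P : List (Int × Int)) (lb ub : List Int) :
    extremos P lb ub = extremos_alt P lb ub := by
  simp only [extremos, extremos_alt]
  rw [PySem.List.foldl_prod_mk
    (f := fun (d : PySem.Dict Int Int) (p : Int × Int) => if PySem.Set.contains (PySem.Set.ofList ub) p.1 && PySem.Set.contains (PySem.Set.ofList ub) p.2 then d.modify p.1 0 (· + 1) else d)
    (g := fun (d : PySem.Dict Int Int) (p : Int × Int) => if PySem.Set.contains (PySem.Set.ofList lb) p.1 && PySem.Set.contains (PySem.Set.ofList lb) p.2 then d.modify p.2 0 (· + 1) else d)]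
  refine Prod.ext ?_ ?_
  · show PySem.Set.diff _ _ = _
    have hswap : (fun (d : PySem.Dict Int Int) (p : Int × Int) => if PySem.Set.contains (PySem.Set.ofList lb) p.1 && PySem.Set.contains (PySem.Set.ofList lb) p.2 then d.modify p.2 0 (· + 1) else d)
        = (fun (d : PySem.Dict Int Int) (p : Int × Int) => if PySem.Set.contains (PySem.Set.ofList lb) p.2 && PySem.Set.contains (PySem.Set.ofList lb) p.1 then d.modify p.2 0 (· + 1) else d) := by
      funext d p; rw [Bool.and_comm]
    rw [hswap]
    exact pv_side P lb Prod.snd Prod.fst (fun n x => (x, n))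
      (fun m x => rfl) (fun m x => rfl)
      (fun p m h => by cases p; cases h; rfl)
  · show PySem.Set.diff _ _ = _
    exact pv_side P ub Prod.fst Prod.snd (fun m x => (m, x))
      (fun m x => rfl) (fun m x => rfl)
      (fun p m h => by cases p; cases h; rfl)

-- ===== VERDICT (by name: the statement is the Claim_ definition above) =====
theorem extremos_spec : Claim_equal_extremos := by
  intro P lb ub _
  unfold Spec_extremos
  exact pv_main P lb ub
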